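-- pv_equiv track=rewrite | github.com/tupteam/code-tasks-crow | main.py | get_tridiagonal_determinant
-- ===== SOURCE A (Python) =====
-- def validate_matrix(matrix: list[list[int]]) -> None:
--     """
--     Проверяет корректность входной матрицы.
--
--     :param matrix: матрица для проверки.
--     :raises Exception: если матрица не соответствует требованиям.
--     """
--     if matrix is None:
--         raise Exception("Параметр не является трехдиагональной матрицей")
--
--     # Проверка, что матрица является списком и не пустая
--     if not isinstance(matrix, list) or len(matrix) < 1:
--         raise Exception("Параметр не является трехдиагональной матрицей")
--
--     row_first_len = len(matrix[0])
--     # Проверка строк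
--     for row in matrix:
--         if not isinstance(row, list) or len(row) != row_first_len:
--             raise Exception("Параметр не является трехдиагональной матрицей")
--         for item in row:
--             if not isinstance(item, int):
--                 raise Exception("Параметр не является трехдиагональной матрицей")
--
--     # Проверка, что матрица квадратная
--     if len(matrix) != row_first_len:
--         raise Exception("Параметр не является трехдиагональной матрицей")
--
--     # Проверка на трехдиагональность
--     for i in range(len(matrix)):
--         for j in range(len(matrix[i])):
--             if abs(i - j) > 1 and matrix[i][j] != 0:
--                 raise Exception("Параметр не является трехдиагональной матрицей")
--                 # Проверка элементов на верхней диагонали (элементы на позиции i, j при j = i + 1)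
--
--     # Проверка одинаковости значений на главной диагонали
--     for i in range(1, len(matrix)):
--         if matrix[i][i] != matrix[0][0]:
--             raise Exception("Параметр не является трехдиагональной матрицей")
--
--     # Проверка диагонали
--     if len(matrix) > 1:
--         # Проверка одинаковости значений на верхней диагонали
--         for i in range(len(matrix) - 1):
--             if matrix[i][i + 1] != matrix[0][1]:
--                 raise Exception("Параметр не является трехдиагональной матрицей")
--
--         # Проверка одинаковости значений на нижней диагонали
--         for i in range(len(matrix) - 1):
--             if matrix[i + 1][i] != matrix[1][0]:
--                 raise Exception("Параметр не является трехдиагональной матрицей")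
--
-- def get_tridiagonal_determinant(matrix: list[list[int]]) -> int:
--     """Вычисляет определитель трехдиагональной целочисленной квадратной матрицы.
--     :param matrix: целочисленная трехдиагональная квадратная матрица.
--
--     :return: значение определителя.
--     """
--     validate_matrix(matrix)
--
--     order = len(matrix)
--
--     if order == 1:
--         return matrix[0][0]
--
--     if order == 2:
--         return matrix[0][0] * matrix[1][1] - matrix[0][1] * matrix[1][0]
--
--     det_prev2 = matrix[0][0]
--     det_prev1 = matrix[0][0] * matrix[1][1] - matrix[0][1] * matrix[1][0]
--
--     for i in range(2, order):
--         a = matrix[i][i]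
--         b = matrix[i][i - 1]
--         c = matrix[i - 1][i]
--         det_current = a * det_prev1 - b * c * det_prev2
--         det_prev2, det_prev1 = det_prev1, det_current
--
--     return det_prev1
-- ===== SOURCE B (Python) =====
-- def validate_matrix(matrix: list[list[int]]) -> None:
--     if matrix is None:
--         raise Exception("Параметр не является трехдиагональной матрицей")
--     if not isinstance(matrix, list) or len(matrix) < 1:
--         raise Exception("Параметр не является трехдиагональной матрицей")
--     row_first_len = len(matrix[0])
--     for row in matrix:
--         if not isinstance(row, list) or len(row) != row_first_len:
--             raise Exception("Параметр не является трехдиагональной матрицей")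
--         for item in row:
--             if not isinstance(item, int):
--                 raise Exception("Параметр не является трехдиагональной матрицей")
--     if len(matrix) != row_first_len:
--         raise Exception("Параметр не является трехдиагональной матрицей")
--     for i in range(len(matrix)):
--         for j in range(len(matrix[i])):
--             if abs(i - j) > 1 and matrix[i][j] != 0:
--                 raise Exception("Параметр не является трехдиагональной матрицей")
--     for i in range(1, len(matrix)):
--         if matrix[i][i] != matrix[0][0]:
--             raise Exception("Параметр не является трехдиагональной матрицей")
--     if len(matrix) > 1:
--         for i in range(len(matrix) - 1):
--             if matrix[i][i + 1] != matrix[0][1]: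
--                 raise Exception("Параметр не является трехдиагональной матрицей")
--         for i in range(len(matrix) - 1):
--             if matrix[i + 1][i] != matrix[1][0]:
--                 raise Exception("Параметр не является трехдиагональной матрицей")
--
--
-- def _mat_mul(x, y):
--     return ((x[0][0] * y[0][0] + x[0][1] * y[1][0],
--              x[0][0] * y[0][1] + x[0][1] * y[1][1]),
--             (x[1][0] * y[0][0] + x[1][1] * y[1][0],
--              x[1][0] * y[0][1] + x[1][1] * y[1][1]))
--
--
-- def _mat_pow(base, e):
--     result = ((1, 0), (0, 1))
--     while e > 0:
--         if e & 1:
--             result = _mat_mul(result, base)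
--         base = _mat_mul(base, base)
--         e >>= 1
--     return result
--
--
-- def get_tridiagonal_determinant(matrix: list[list[int]]) -> int:
--     """Determinant via the constant 2x2 transfer matrix raised by fast exponentiation."""
--     validate_matrix(matrix)
--     order = len(matrix)
--     a = matrix[0][0]
--     if order == 1:
--         return a
--     b = matrix[1][0]
--     c = matrix[0][1]
--     p = _mat_pow(((a, -b * c), (1, 0)), order - 1)
--     return p[0][0] * a + p[0][1]
-- ===== Notes on version B (the rewrite author's own statement) =====
-- stated objective: alternative
-- what changed: The determinant's linear second-order recurrence loop is replaced by fast exponentiation (repeated squaring) of the constant 2x2 transfer matrix [[a,-b*c],[1,0]] applied to the base vector (D1,D0)=(a,1); validate_matrix is unchanged and still called first.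
import Mathlib
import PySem

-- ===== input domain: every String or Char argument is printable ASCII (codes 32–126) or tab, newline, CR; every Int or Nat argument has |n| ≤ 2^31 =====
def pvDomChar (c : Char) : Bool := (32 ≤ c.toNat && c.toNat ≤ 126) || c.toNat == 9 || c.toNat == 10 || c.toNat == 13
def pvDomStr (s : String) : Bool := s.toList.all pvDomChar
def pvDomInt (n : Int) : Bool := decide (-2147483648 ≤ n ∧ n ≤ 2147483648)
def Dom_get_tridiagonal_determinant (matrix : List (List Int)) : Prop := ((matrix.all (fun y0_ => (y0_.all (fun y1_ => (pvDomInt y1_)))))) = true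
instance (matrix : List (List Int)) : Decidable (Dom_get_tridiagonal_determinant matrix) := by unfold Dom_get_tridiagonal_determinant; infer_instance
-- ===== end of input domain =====

-- B replaces A's linear second-order recurrence loop by fast exponentiation of the constant
-- 2x2 transfer matrix [[a,-bc],[1,0]] (O(log n) multiplies); validation is unchanged.


-- ===== PORT A =====
-- matrix[i][j] for Nat indices; exact under Pre_ (all reads are in range there)
def gN (m : List (List Int)) (i j : Nat) : Int := (m.getD i []).getD j 0
-- matrix[i][j] for the Int loop indices of A's loop; exact under Pre_ (there 1 ≤ i, so
-- i and i-1 are nonnegative and in range, and toNat is the identity on them)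
def gI (m : List (List Int)) (i j : Int) : Int := (m.getD i.toNat []).getD j.toNat 0

-- validate_matrix as a Bool: true = returns normally, false = raises (A's type/None checks
-- cannot fail under the type convention)
def validate_matrix (m : List (List Int)) : Bool :=
  if m.length < 1 then false else
  ((m.all fun row => row.length == (m.getD 0 []).length) &&
   (m.length == (m.getD 0 []).length) &&
   ((List.range m.length).all fun i =>
      (List.range (m.getD i []).length).all fun j =>
        !(decide (((i : Int) - (j : Int)).natAbs > 1) && (gN m i j != 0))) &&
   ((List.range' 1 (m.length - 1)).all fun i => gN m i i == gN m 0 0) &&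
   (if 1 < m.length then
      ((List.range (m.length - 1)).all fun i => gN m i (i + 1) == gN m 0 1) &&
      ((List.range (m.length - 1)).all fun i => gN m (i + 1) i == gN m 1 0)
    else true))

def get_tridiagonal_determinant (matrix : List (List Int)) : Int :=
  if validate_matrix matrix = false then 0   -- A raises here; excluded by Pre_
  else
    let order := matrix.length
    if order = 1 then gN matrix 0 0
    else if order = 2 then
      gN matrix 0 0 * gN matrix 1 1 - gN matrix 0 1 * gN matrix 1 0
    else
      -- state (det_prev2, det_prev1)
      let st := (PySem.List.pyRange 2 (order : Int) 1).foldl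
        (fun (s : Int × Int) (i : Int) =>
          let a := gI matrix i i
          let b := gI matrix i (i - 1)
          let c := gI matrix (i - 1) i
          (s.2, a * s.2 - b * c * s.1))
        (gN matrix 0 0,
         gN matrix 0 0 * gN matrix 1 1 - gN matrix 0 1 * gN matrix 1 0)
      st.2

-- ===== PORT B =====
def mat_mul (x y : (Int × Int) × (Int × Int)) : (Int × Int) × (Int × Int) :=
  ((x.1.1 * y.1.1 + x.1.2 * y.2.1, x.1.1 * y.1.2 + x.1.2 * y.2.2),
   (x.2.1 * y.1.1 + x.2.2 * y.2.1, x.2.1 * y.1.2 + x.2.2 * y.2.2))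

-- _mat_pow's while loop (e ≥ 0 always: e = order-1)
def mat_pow (base : (Int × Int) × (Int × Int)) (e : Nat)
    (result : (Int × Int) × (Int × Int)) : (Int × Int) × (Int × Int) :=
  if h : e = 0 then result
  else mat_pow (mat_mul base base) (e / 2)
         (if e % 2 = 1 then mat_mul result base else result)
  termination_by e
  decreasing_by exact Nat.div_lt_self (Nat.pos_of_ne_zero h) one_lt_two

def get_tridiagonal_determinant_alt (matrix : List (List Int)) : Int :=
  if validate_matrix matrix = false then 0   -- B raises here too; excluded by Pre_
  else
    let order := matrix.length
    let a := gN matrix 0 0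
    if order = 1 then a
    else
      let b := gN matrix 1 0
      let c := gN matrix 0 1
      let p := mat_pow ((a, -(b * c)), (1, 0)) (order - 1) ((1, 0), (0, 1))
      p.1.1 * a + p.1.2

-- ===== PRECONDITION & SPEC =====
-- Pre_ excludes exactly the matrices on which validate_matrix (hence A, and B alike) raises:
-- empty, non-square, not tridiagonal, or with a non-constant diagonal.
def Pre_get_tridiagonal_determinant (matrix : List (List Int)) : Prop :=
  1 ≤ matrix.length ∧
  (∀ row ∈ matrix, row.length = matrix.length) ∧
  (∀ i < matrix.length, ∀ j < matrix.length,
      (i > j + 1 ∨ j > i + 1) → gN matrix i j = 0) ∧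
  (∀ i < matrix.length, gN matrix i i = gN matrix 0 0) ∧
  (∀ i < matrix.length, i + 1 < matrix.length →
      gN matrix i (i + 1) = gN matrix 0 1 ∧ gN matrix (i + 1) i = gN matrix 1 0)
instance (matrix : List (List Int)) : Decidable (Pre_get_tridiagonal_determinant matrix) := by
  unfold Pre_get_tridiagonal_determinant; infer_instance

def pvWitness_get_tridiagonal_determinant : List (List Int) :=
  [[2, 1, 0], [3, 2, 1], [0, 3, 2]]

def Spec_get_tridiagonal_determinant (matrix : List (List Int)) (out : Int) : Prop := out = get_tridiagonal_determinant_alt matrix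
instance (matrix : List (List Int)) (out : Int) : Decidable (Spec_get_tridiagonal_determinant matrix out) := by unfold Spec_get_tridiagonal_determinant; infer_instance

-- ===== CLAIM (what is proved, stated in full; the proofs are below) =====
def Claim_equal_get_tridiagonal_determinant : Prop := ∀ (matrix : List (List Int)), Dom_get_tridiagonal_determinant matrix → Pre_get_tridiagonal_determinant matrix → Spec_get_tridiagonal_determinant matrix (get_tridiagonal_determinant matrix)

-- ===== LEMMAS AND PROOFS =====
-- the shared second-order recurrence D_0 = 1, D_1 = a, D_{k+2} = a·D_{k+1} - bc·D_k
def fRec (a bc : Int) : Nat → Int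
  | 0 => 1
  | 1 => a
  | (k + 2) => a * fRec a bc (k + 1) - bc * fRec a bc k

-- plain iterated power, the reference both sides are reduced to
def pw (m : (Int × Int) × (Int × Int)) : Nat → (Int × Int) × (Int × Int)
  | 0 => ((1, 0), (0, 1))
  | k + 1 => mat_mul (pw m k) m

lemma mat_mul_assoc (x y z : (Int × Int) × (Int × Int)) :
    mat_mul (mat_mul x y) z = mat_mul x (mat_mul y z) := by
  simp only [mat_mul, Prod.mk.injEq]
  refine ⟨⟨by ring, by ring⟩, by ring, by ring⟩

lemma mat_mul_one (x : (Int × Int) × (Int × Int)) :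
    mat_mul x ((1, 0), (0, 1)) = x := by
  simp [mat_mul]

lemma one_mat_mul (x : (Int × Int) × (Int × Int)) :
    mat_mul ((1, 0), (0, 1)) x = x := by
  simp [mat_mul]

lemma pw_add (m : (Int × Int) × (Int × Int)) (j k : Nat) :
    pw m (j + k) = mat_mul (pw m j) (pw m k) := by
  induction k with
  | zero => simp [pw, mat_mul_one]
  | succ k ih => rw [← Nat.add_assoc]; simp [pw, ih, mat_mul_assoc]

lemma pw_sq (m : (Int × Int) × (Int × Int)) (k : Nat) :
    pw (mat_mul m m) k = pw m (2 * k) := by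
  induction k with
  | zero => simp [pw]
  | succ k ih =>
    have : 2 * (k + 1) = 2 * k + (1 + 1) := by ring
    rw [pw, ih, this, pw_add, pw_add]
    simp [pw, one_mat_mul]

lemma mat_pow_eq (e : Nat) : ∀ base result,
    mat_pow base e result = mat_mul result (pw base e) := by
  induction e using Nat.strong_induction_on with
  | _ e ih =>
    intro base result
    by_cases h : e = 0
    · subst h; rw [mat_pow]; simp [pw, mat_mul_one]
    · rw [mat_pow]; simp only [h, reduceDIte]
      rw [ih (e / 2) (Nat.div_lt_self (Nat.pos_of_ne_zero h) one_lt_two), pw_sq]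
      rcases Nat.mod_two_eq_zero_or_one e with hm | hm
      · have h2 : 2 * (e / 2) = e := by omega
        simp [hm, h2]
      · have h2 : 1 + 2 * (e / 2) = e := by omega
        simp only [hm, reduceIte]
        rw [mat_mul_assoc]
        congr 1
        conv_rhs => rw [← h2]
        rw [pw_add]
        simp [pw, one_mat_mul]

-- applying the power of the transfer matrix to the base-case vector (D_1, D_0) steps fRec
lemma pw_vec (a bc : Int) (k : Nat) : ∀ j : Nat,
    (pw ((a, -bc), (1, 0)) k).1.1 * fRec a bc (j + 1) + (pw ((a, -bc), (1, 0)) k).1.2 * fRec a bc j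
      = fRec a bc (k + j + 1) ∧
    (pw ((a, -bc), (1, 0)) k).2.1 * fRec a bc (j + 1) + (pw ((a, -bc), (1, 0)) k).2.2 * fRec a bc j
      = fRec a bc (k + j) := by
  induction k with
  | zero => intro j; simp [pw]
  | succ k ih =>
    intro j
    have h1 := (ih (j + 1)).1
    have h2 := (ih (j + 1)).2
    have hf : fRec a bc (j + 1 + 1) = a * fRec a bc (j + 1) - bc * fRec a bc j := rfl
    refine ⟨?_, ?_⟩ <;> simp only [pw, mat_mul]
    · have e : k + 1 + j + 1 = k + (j + 1) + 1 := by omega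
      rw [e, ← h1, hf]; ring
    · have e : k + 1 + j = k + (j + 1) := by omega
      rw [e, ← h2, hf]; ring

lemma getD_mem {m : List (List Int)} {i : Nat} (h : i < m.length) : m.getD i [] ∈ m := by
  rw [List.getD_eq_getElem _ _ h]; exact List.getElem_mem h

lemma pre_valid {m : List (List Int)} (hp : Pre_get_tridiagonal_determinant m) :
    validate_matrix m = true := by
  obtain ⟨h1, hrows, hzero, hdiag, hoff⟩ := hp
  have hlen : ∀ i < m.length, (m.getD i []).length = m.length :=
    fun i hi => hrows _ (getD_mem hi)
  unfold validate_matrix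
  rw [if_neg (by omega)]
  simp only [Bool.and_eq_true, List.all_eq_true, beq_iff_eq, List.mem_range,
    List.mem_range', Bool.not_eq_true', Bool.and_eq_false_iff, bne_eq_false_iff_eq,
    decide_eq_false_iff_not]
  refine ⟨⟨⟨⟨fun row hr => by rw [hrows _ hr, hlen 0 (by omega)],
      by rw [hlen 0 (by omega)]⟩, ?_⟩, ?_⟩, ?_⟩
  · intro i hi j hj
    by_cases hd : ((i : Int) - (j : Int)).natAbs > 1
    · right; exact hzero i hi j (by rwa [hlen i hi] at hj) (by omega)
    · left; exact hd
  · rintro x ⟨i, hi, rfl⟩; exact hdiag _ (by omega)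
  · split_ifs with h2
    · simp only [Bool.and_eq_true, List.all_eq_true, List.mem_range, beq_iff_eq]
      exact ⟨fun i hi => (hoff i (by omega) (by omega)).1,
             fun i hi => (hoff i (by omega) (by omega)).2⟩
    · rfl

-- A's loop with the matrix reads replaced by the constants, as a clean recurrence
lemma loopA (a bc : Int) (k : Nat) :
    (PySem.List.pyRange 2 (2 + (k : Int)) 1).foldl
        (fun (s : Int × Int) (_ : Int) => (s.2, a * s.2 - bc * s.1))
        (fRec a bc 1, fRec a bc 2)
      = (fRec a bc (1 + k), fRec a bc (2 + k)) := by
  induction k with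
  | zero => simp [PySem.List.pyRange_one_eq_nil]
  | succ k ih =>
    have hcast : (2 : Int) + ((k : Nat) + 1 : Nat) = (2 + (k : Int)) + 1 := by push_cast; ring
    rw [hcast, PySem.List.pyRange_one_succ_right (by omega), List.foldl_append, ih]
    simp only [List.foldl_cons, List.foldl_nil]
    rw [show 1 + (k + 1) = 2 + k by omega, show 2 + (k + 1) = (k + 1) + 2 by omega, fRec,
        show 2 + k = k + 1 + 1 by omega, show 1 + k = k + 1 by omega]

lemma A_val {m : List (List Int)} (hp : Pre_get_tridiagonal_determinant m) :
    get_tridiagonal_determinant m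
      = fRec (gN m 0 0) (gN m 1 0 * gN m 0 1) m.length := by
  obtain ⟨h1, hrows, hzero, hdiag, hoff⟩ := hp
  have hv := pre_valid ⟨h1, hrows, hzero, hdiag, hoff⟩
  unfold get_tridiagonal_determinant
  rw [hv]
  simp only [Bool.true_eq_false, if_false]
  set n := m.length with hn
  by_cases hone : n = 1
  · simp [hone, fRec]
  by_cases htwo : n = 2
  · have h11 : gN m 1 1 = gN m 0 0 := hdiag 1 (by omega)
    have hf2 : fRec (gN m 0 0) (gN m 1 0 * gN m 0 1) 2
        = gN m 0 0 * gN m 0 0 - gN m 1 0 * gN m 0 1 * 1 := rfl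
    rw [htwo, if_neg (by omega : ¬(2 = 1)), if_pos rfl, h11, hf2]; ring
  · -- n ≥ 3
    have hn3 : 3 ≤ n := by omega
    rw [if_neg hone, if_neg htwo]
    have h11 : gN m 1 1 = gN m 0 0 := hdiag 1 (by omega)
    set a := gN m 0 0
    set bc := gN m 1 0 * gN m 0 1
    -- replace the matrix reads in the loop body by the constants
    have hbody : (PySem.List.pyRange 2 (n : Int) 1).foldl
        (fun (s : Int × Int) (i : Int) =>
          (s.2, gI m i i * s.2 - gI m i (i - 1) * gI m (i - 1) i * s.1))
        (a, a * gN m 1 1 - gN m 0 1 * gN m 1 0)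
        = (PySem.List.pyRange 2 (n : Int) 1).foldl
        (fun (s : Int × Int) (_ : Int) => (s.2, a * s.2 - bc * s.1))
        (a, a * gN m 1 1 - gN m 0 1 * gN m 1 0) := by
      apply PySem.List.foldl_congr_mem
      intro s i hi
      rw [PySem.List.mem_pyRange_one] at hi
      obtain ⟨hi2, hin⟩ := hi
      set t := i.toNat with ht
      have h2t : 2 ≤ t := by omega
      have htn : t < n := by omega
      have hii : gI m i i = a := by
        show gN m t t = a; exact hdiag t htn
      have hsub : gI m i (i - 1) = gN m 1 0 := by
        show gN m t (i - 1).toNat = _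
        have : (i - 1).toNat = (t - 1) := by omega
        rw [this]
        have := (hoff (t - 1) (by omega) (by omega)).2
        have he : t - 1 + 1 = t := by omega
        rw [he] at this; exact this
      have hsup : gI m (i - 1) i = gN m 0 1 := by
        show gN m (i - 1).toNat t = _
        have : (i - 1).toNat = (t - 1) := by omega
        rw [this]
        have := (hoff (t - 1) (by omega) (by omega)).1
        have he : t - 1 + 1 = t := by omega
        rw [he] at this; exact this
      rw [hii, hsub, hsup]
    show ((PySem.List.pyRange 2 (n : Int) 1).foldl
        (fun (s : Int × Int) (i : Int) =>
          (s.2, gI m i i * s.2 - gI m i (i - 1) * gI m (i - 1) i * s.1))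
        (gN m 0 0, gN m 0 0 * gN m 1 1 - gN m 0 1 * gN m 1 0)).2 = fRec a bc n
    rw [hbody]
    have hinit1 : a * gN m 1 1 - gN m 0 1 * gN m 1 0 = fRec a bc 2 := by
      have hf2 : fRec a bc 2 = a * a - bc * 1 := rfl
      rw [h11, hf2]; show a * a - gN m 0 1 * gN m 1 0 = a * a - gN m 1 0 * gN m 0 1 * 1; ring
    obtain ⟨k, hkn⟩ : ∃ k : Nat, n = 2 + k := ⟨n - 2, by omega⟩
    rw [hkn]
    have hc : ((2 + k : Nat) : Int) = 2 + (k : Int) := by push_cast; ring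
    rw [hc]
    show (List.foldl _ (gN m 0 0, a * gN m 1 1 - gN m 0 1 * gN m 1 0) _).2 = _
    rw [hinit1]
    have hl := loopA a bc k
    rw [show fRec a bc 1 = a from rfl] at hl
    rw [hl]

lemma B_val {m : List (List Int)} (hp : Pre_get_tridiagonal_determinant m) :
    get_tridiagonal_determinant_alt m
      = fRec (gN m 0 0) (gN m 1 0 * gN m 0 1) m.length := by
  have hv := pre_valid hp
  obtain ⟨h1, _, _, _, _⟩ := hp
  unfold get_tridiagonal_determinant_alt
  rw [hv]
  simp only [Bool.true_eq_false, if_false]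
  set n := m.length with hn
  set a := gN m 0 0
  set bc := gN m 1 0 * gN m 0 1
  by_cases hone : n = 1
  · simp [hone, fRec]
  · rw [if_neg hone]
    rw [mat_pow_eq, one_mat_mul]
    have := (pw_vec a bc (n - 1) 0).1
    simp only [fRec] at this
    have he : n - 1 + 0 + 1 = n := by omega
    rw [he] at this
    rw [← this]; ring

-- ===== VERDICT (by name: the statement is the Claim_ definition above) =====
theorem get_tridiagonal_determinant_spec : Claim_equal_get_tridiagonal_determinant := by
  intro m _ hpre
  unfold Spec_get_tridiagonal_determinant
  rw [A_val hpre, B_val hpre]
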